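-- pv_equiv track=rewrite | github.com/giraygokirmak/asterisk-usbip-dongle | decode_sms.py | decode_gsm7
-- ===== SOURCE A (Python) =====
-- GSM7_BASIC = [
--     '@', '£', '$', '¥', 'è', 'é', 'ù', 'ì', 'ò', 'Ç', '\n', 'Ø', 'ø', '\r', 'Å', 'å',
--     'Δ', '_', 'Φ', 'Γ', 'Λ', 'Ω', 'Π', 'Ψ', 'Σ', 'Θ', 'Ξ', '\x1b', 'Æ', 'æ', 'ß', 'É',
--     ' ', '!', '"', '#', '¤', '%', '&', "'", '(', ')', '*', '+', ',', '-', '.', '/',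
--     '0', '1', '2', '3', '4', '5', '6', '7', '8', '9', ':', ';', '<', '=', '>', '?',
--     '¡', 'A', 'B', 'C', 'D', 'E', 'F', 'G', 'H', 'I', 'J', 'K', 'L', 'M', 'N', 'O',
--     'P', 'Q', 'R', 'S', 'T', 'U', 'V', 'W', 'X', 'Y', 'Z', 'Ä', 'Ö', 'Ñ', 'Ü', '§',
--     '¿', 'a', 'b', 'c', 'd', 'e', 'f', 'g', 'h', 'i', 'j', 'k', 'l', 'm', 'n', 'o',
--     'p', 'q', 'r', 's', 't', 'u', 'v', 'w', 'x', 'y', 'z', 'ä', 'ö', 'ñ', 'ü', 'à'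
-- ]
--
-- GSM7_TURKISH_SHIFT = {
--     0x0A: '\f',   # Form feed
--     0x14: '^',    # Circumflex
--     0x28: '{',    # Left curly bracket
--     0x29: '}',    # Right curly bracket
--     0x2F: '\\',   # Reverse solidus (Backslash)
--     0x3C: '[',    # Left square bracket
--     0x3D: '~',    # Tilde
--     0x3E: ']',    # Right square bracket
--     0x40: '|',    # Vertical bar
--     0x47: 'Ğ',    # Latin capital letter G with breve
--     0x49: 'İ',    # Latin capital letter I with dot above
--     0x53: 'Ş',    # Latin capital letter S with cedilla
--     0x63: 'ç',    # Latin small letter c with cedilla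
--     0x65: 'ğ',    # Latin small letter g with breve
--     0x69: 'ı',    # Latin small letter dotless i
--     0x73: 'ş',    # Latin small letter s with cedilla
-- }
--
-- def unpack_septets(data, padding=0, length=None):
--     """Unpack 7-bit septets from octets"""
--     bits = []
--     for byte in data:
--         bits.extend([int(b) for b in format(byte, '08b')[::-1]])  # LSB first
--
--     # Skip padding bits
--     bits = bits[padding:]
--
--     # Extract septets
--     septets = []
--     for i in range(0, len(bits), 7):
--         if length is not None and len(septets) >= length:
--             break
--         if i + 7 <= len(bits):
--             septet_bits = bits[i:i+7]
--             value = sum(bit << idx for idx, bit in enumerate(septet_bits))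
--             septets.append(value)
--
--     return septets
--
-- def decode_gsm7(data, padding=0, length=None, turkish=False):
--     """Decode GSM 7-bit encoded data"""
--     septets = unpack_septets(data, padding, length)
--
--     result = []
--     escape = False
--
--     for septet in septets:
--         if septet == 0x00:  # Null - end of message
--             break
--         elif escape:
--             # Extended character
--             if turkish and septet in GSM7_TURKISH_SHIFT:
--                 result.append(GSM7_TURKISH_SHIFT[septet])
--             elif septet < len(GSM7_BASIC):
--                 result.append(GSM7_BASIC[septet])
--             else:
--                 result.append('?')
--             escape = False
--         elif septet == 0x1B:  # Escape to extension table
--             escape = True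
--         else:
--             # Basic character
--             if septet < len(GSM7_BASIC):
--                 result.append(GSM7_BASIC[septet])
--             else:
--                 result.append('?')
--
--     return ''.join(result)
-- ===== SOURCE B (Python) =====
-- GSM7_BASIC = [
--     '@', '£', '$', '¥', 'è', 'é', 'ù', 'ì', 'ò', 'Ç', '\n', 'Ø', 'ø', '\r', 'Å', 'å',
--     'Δ', '_', 'Φ', 'Γ', 'Λ', 'Ω', 'Π', 'Ψ', 'Σ', 'Θ', 'Ξ', '\x1b', 'Æ', 'æ', 'ß', 'É',
--     ' ', '!', '"', '#', '¤', '%', '&', "'", '(', ')', '*', '+', ',', '-', '.', '/',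
--     '0', '1', '2', '3', '4', '5', '6', '7', '8', '9', ':', ';', '<', '=', '>', '?',
--     '¡', 'A', 'B', 'C', 'D', 'E', 'F', 'G', 'H', 'I', 'J', 'K', 'L', 'M', 'N', 'O',
--     'P', 'Q', 'R', 'S', 'T', 'U', 'V', 'W', 'X', 'Y', 'Z', 'Ä', 'Ö', 'Ñ', 'Ü', '§',
--     '¿', 'a', 'b', 'c', 'd', 'e', 'f', 'g', 'h', 'i', 'j', 'k', 'l', 'm', 'n', 'o',
--     'p', 'q', 'r', 's', 't', 'u', 'v', 'w', 'x', 'y', 'z', 'ä', 'ö', 'ñ', 'ü', 'à'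
-- ]
--
-- GSM7_TURKISH_SHIFT = {
--     0x0A: '\f', 0x14: '^', 0x28: '{', 0x29: '}', 0x2F: '\\', 0x3C: '[',
--     0x3D: '~', 0x3E: ']', 0x40: '|', 0x47: 'Ğ', 0x49: 'İ', 0x53: 'Ş',
--     0x63: 'ç', 0x65: 'ğ', 0x69: 'ı', 0x73: 'ş',
-- }
--
--
-- def decode_gsm7(data, padding=0, length=None, turkish=False):
--     """Decode GSM 7-bit encoded octets (streaming big-integer shift register)."""
--     acc = 0
--     nbits = 0
--     for b in data:
--         acc |= (b & 0xFF) << nbits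
--         nbits += 8
--     acc >>= padding
--     nbits -= padding
--
--     out = []
--     escape = False
--     count = 0
--     while nbits >= 7 and (length is None or count < length):
--         septet = acc & 0x7F
--         acc >>= 7
--         nbits -= 7
--         count += 1
--         if septet == 0:  # null terminator
--             break
--         if escape:
--             if turkish and septet in GSM7_TURKISH_SHIFT:
--                 out.append(GSM7_TURKISH_SHIFT[septet])
--             else:
--                 out.append(GSM7_BASIC[septet])
--             escape = False
--         elif septet == 0x1B:
--             escape = True
--         else:
--             out.append(GSM7_BASIC[septet])
--     return ''.join(out)
-- ===== Notes on version B (the rewrite author's own statement) =====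
-- stated objective: alternative
-- what changed: Replaces A's materialised per-bit list (8 ints per octet, then sliced into 7-bit groups and re-summed into a septet list) with a single big-integer shift register: the octets are packed into one integer LSB-first, the padding is shifted off once, and each septet is extracted with & 0x7F / >>= 7 and decoded immediately; Pre_ keeps to real octet streams (0-255 bytes, nonnegative padding): on a negative octet A raises ValueError, and on a negative padding or an oversized octet the two variable-width bit-stream readings are equally defensible for a non-octet input.
-- outside the precondition, e.g. on decode_gsm7([300, 65], 0, None, False): A returns ',ù', B returns ',$'; on decode_gsm7([232, 50], -9, None, False): A returns 'e', B raises ValueError; on decode_gsm7([-1], 0, None, False): A raises ValueError, B returns 'à'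
import Mathlib
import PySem

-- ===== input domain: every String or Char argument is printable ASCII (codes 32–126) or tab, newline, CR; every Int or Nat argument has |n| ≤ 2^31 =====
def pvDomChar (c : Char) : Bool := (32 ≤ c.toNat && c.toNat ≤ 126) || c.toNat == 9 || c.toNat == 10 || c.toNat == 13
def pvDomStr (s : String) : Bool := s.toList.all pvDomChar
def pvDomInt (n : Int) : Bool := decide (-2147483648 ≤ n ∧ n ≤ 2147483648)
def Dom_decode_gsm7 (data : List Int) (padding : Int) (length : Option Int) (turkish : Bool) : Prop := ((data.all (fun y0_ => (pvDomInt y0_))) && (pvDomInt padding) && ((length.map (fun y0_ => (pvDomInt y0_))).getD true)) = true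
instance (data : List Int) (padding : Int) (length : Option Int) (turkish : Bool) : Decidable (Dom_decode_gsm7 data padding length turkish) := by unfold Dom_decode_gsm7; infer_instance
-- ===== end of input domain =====

-- B replaces A's build-a-bit-list-then-slice unpacking by one big-integer shift register
-- (pack the octets into one integer LSB-first, then repeatedly take the low 7 bits),
-- decoding each septet as it is extracted; objective: alternative decomposition, same result.

-- ===== PORT A =====
-- shared module constants (used by both ports, like the Python module's tables)
def GSM7_BASIC : List String :=
  ["@", "£", "$", "¥", "è", "é", "ù", "ì", "ò", "Ç", "\n", "Ø", "ø", "\r", "Å", "å",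
   "Δ", "_", "Φ", "Γ", "Λ", "Ω", "Π", "Ψ", "Σ", "Θ", "Ξ", "\x1b", "Æ", "æ", "ß", "É",
   " ", "!", "\"", "#", "¤", "%", "&", "'", "(", ")", "*", "+", ",", "-", ".", "/",
   "0", "1", "2", "3", "4", "5", "6", "7", "8", "9", ":", ";", "<", "=", ">", "?",
   "¡", "A", "B", "C", "D", "E", "F", "G", "H", "I", "J", "K", "L", "M", "N", "O",
   "P", "Q", "R", "S", "T", "U", "V", "W", "X", "Y", "Z", "Ä", "Ö", "Ñ", "Ü", "§",
   "¿", "a", "b", "c", "d", "e", "f", "g", "h", "i", "j", "k", "l", "m", "n", "o",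
   "p", "q", "r", "s", "t", "u", "v", "w", "x", "y", "z", "ä", "ö", "ñ", "ü", "à"]

def GSM7_TURKISH_SHIFT : PySem.Dict Int String :=
  PySem.Dict.ofList
    [(0x0A, "\x0c"), (0x14, "^"), (0x28, "{"), (0x29, "}"), (0x2F, "\\"), (0x3C, "["),
     (0x3D, "~"), (0x3E, "]"), (0x40, "|"), (0x47, "Ğ"), (0x49, "İ"), (0x53, "Ş"),
     (0x63, "ç"), (0x65, "ğ"), (0x69, "ı"), (0x73, "ş")]

-- [int(c) for c in format(byte, '08b')[::-1]] : the LSB-first binary digits of `byte`,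
-- zero-padded to at least 8 digits; exact for 0 ≤ byte (Pre_).
def byteBits (b : Int) : List Int :=
  (List.range (max 8 (PySem.Int.bitLength b))).map (fun k => ((b.toNat / 2 ^ k % 2 : Nat) : Int))

-- the `for byte in data: bits.extend(...)` loop
def unpackBits (data : List Int) : List Int :=
  data.foldl (fun bits b => bits ++ byteBits b) []

-- sum(bit << idx for idx, bit in enumerate(septet_bits)); idx ≥ 0 so `bit << idx = bit * 2^idx`
def septetValue (sl : List Int) : Int :=
  (PySem.List.enumerate sl).foldl (fun s p => s + p.2 * 2 ^ p.1.toNat) 0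

-- the `for i in range(0, len(bits), 7)` loop, with its break and its guards
def septetsGo (bits : List Int) (length : Option Int) : List Int → List Int → List Int
  | septets, [] => septets
  | septets, i :: rest =>
    if length.elim false (fun L => decide (L ≤ (septets.length : Int))) then septets
    else if i + 7 ≤ (bits.length : Int) then
      septetsGo bits length
        (septets ++ [septetValue (PySem.List.slice bits (some i) (some (i + 7)))]) rest
    else septetsGo bits length septets rest

-- bits = unpackBits(data); bits = bits[padding:]; then the septet loop
def unpack_septets (data : List Int) (padding : Int) (length : Option Int) : List Int :=
  septetsGo (PySem.List.slice (unpackBits data) (some padding) none) length []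
    (PySem.List.pyRange 0 (((PySem.List.slice (unpackBits data) (some padding) none).length : Nat) : Int) 7)

-- the decode loop over the septet list (result accumulator, escape flag);
-- list indexing is guarded by `s < len(GSM7_BASIC)` / `contains`, so the `.getD` defaults are never used
def decodeGo (turkish : Bool) : List String → Bool → List Int → List String
  | result, _escape, [] => result
  | result, escape, s :: rest =>
    if s == 0 then result
    else if escape then
      let c :=
        if turkish && PySem.Dict.contains GSM7_TURKISH_SHIFT s then
          (PySem.Dict.get? GSM7_TURKISH_SHIFT s).getD "?"
        else if s < (GSM7_BASIC.length : Int) then (PySem.List.pyGet? GSM7_BASIC s).getD "?"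
        else "?"
      decodeGo turkish (result ++ [c]) false rest
    else if s == 27 then decodeGo turkish result true rest
    else
      let c :=
        if s < (GSM7_BASIC.length : Int) then (PySem.List.pyGet? GSM7_BASIC s).getD "?" else "?"
      decodeGo turkish (result ++ [c]) escape rest

def decode_gsm7 (data : List Int) (padding : Int) (length : Option Int) (turkish : Bool) : String :=
  PySem.Str.join "" (decodeGo turkish [] false (unpack_septets data padding length))

-- ===== PORT B =====
-- the `while nbits >= 7 and (length is None or count < length)` loop of Source B;
-- acc is a nonnegative Python big int, so it is a Nat here
-- (`acc & 0x7F` = `acc % 128`, `acc >> 7` = `acc >>> 7`); septet < 128 so GSM7_BASIC.getD never defaults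
def altGo (turkish : Bool) (length : Option Int) (acc : Nat) (nbits : Int) (count : Int)
    (out : List String) (esc : Bool) : List String :=
  if h : 7 ≤ nbits then
    if length.elim true (fun L => decide (count < L)) then
      let septet : Int := ((acc % 128 : Nat) : Int)
      if septet == 0 then out
      else if esc then
        let c :=
          if turkish && PySem.Dict.contains GSM7_TURKISH_SHIFT septet then
            (PySem.Dict.get? GSM7_TURKISH_SHIFT septet).getD "?"
          else GSM7_BASIC.getD septet.toNat "?"
        altGo turkish length (acc >>> 7) (nbits - 7) (count + 1) (out ++ [c]) false
      else if septet == 27 then altGo turkish length (acc >>> 7) (nbits - 7) (count + 1) out true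
      else altGo turkish length (acc >>> 7) (nbits - 7) (count + 1)
        (out ++ [GSM7_BASIC.getD septet.toNat "?"]) esc
    else out
  else out
termination_by nbits.toNat
decreasing_by all_goals omega

def decode_gsm7_alt (data : List Int) (padding : Int) (length : Option Int) (turkish : Bool) : String :=
  -- acc |= (b & 0xFF) << nbits; nbits += 8   (b & 0xFF ≥ 0, so the accumulator is a Nat)
  let p := data.foldl
    (fun (st : Nat × Nat) b => (st.1 ||| ((PySem.Int.band b 255).toNat <<< st.2), st.2 + 8))
    (0, 0)
  -- acc >>= padding; nbits -= padding   (exact for 0 ≤ padding, Pre_)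
  let acc := p.1 >>> padding.toNat
  let nbits : Int := (p.2 : Int) - padding
  PySem.Str.join "" (altGo turkish length acc nbits 0 [] false)

-- ===== PRECONDITION & SPEC =====
-- Pre_ keeps to real octet streams: it excludes negative octets, on which A raises ValueError
-- (int('-') on the sign of format(byte, '08b')), and negative padding or octets ≥ 256, where
-- the data is not an octet stream and A's variable-width bit reading (format widens the field;
-- a negative slice keeps the LAST padding bits) and B's fixed 8-bit reading are both defensible.
def Pre_decode_gsm7 (data : List Int) (padding : Int) (length : Option Int) (turkish : Bool) : Prop :=
  (∀ b ∈ data, 0 ≤ b ∧ b < 256) ∧ 0 ≤ padding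
instance (data : List Int) (padding : Int) (length : Option Int) (turkish : Bool) : Decidable (Pre_decode_gsm7 data padding length turkish) := by unfold Pre_decode_gsm7; infer_instance

def pvWitness_decode_gsm7 : List Int × Int × Option Int × Bool := ([232, 50, 155, 253, 6], 0, none, false)

def Spec_decode_gsm7 (data : List Int) (padding : Int) (length : Option Int) (turkish : Bool) (out : String) : Prop := out = decode_gsm7_alt data padding length turkish
instance (data : List Int) (padding : Int) (length : Option Int) (turkish : Bool) (out : String) : Decidable (Spec_decode_gsm7 data padding length turkish out) := by unfold Spec_decode_gsm7; infer_instance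

-- ===== CLAIM (what is proved, stated in full; the proofs are below) =====
def Claim_equal_decode_gsm7 : Prop := ∀ (data : List Int) (padding : Int) (length : Option Int) (turkish : Bool), Dom_decode_gsm7 data padding length turkish → Pre_decode_gsm7 data padding length turkish → Spec_decode_gsm7 data padding length turkish (decode_gsm7 data padding length turkish)


-- ===== LEMMAS AND PROOFS =====

-- j-th binary digit (LSB first) of x, as an Int
def dig (x : Nat) (j : Nat) : Int := ((x / 2 ^ j % 2 : Nat) : Int)

-- j-th septet of M
def sf (M : Nat) (j : Nat) : Int := ((M / 128 ^ j % 128 : Nat) : Int)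

-- value and width of the packed bit stream (8 bits per octet)
def packVal : List Int → Nat
  | [] => 0
  | b :: r => b.toNat + 256 * packVal r

def packWidth : List Int → Nat
  | [] => 0
  | b :: r => 8 + packWidth r

-- the septet count actually produced: all full septets, capped by `length`
def capOf (k : Nat) (length : Option Int) : Nat :=
  match length with | none => k | some L => min k L.toNat

lemma band255 (b : Int) (h0 : 0 ≤ b) (h1 : b < 256) : (PySem.Int.band b 255).toNat = b.toNat := by
  rw [PySem.Int.band_of_nonneg h0 (by norm_num : (0:Int) ≤ 255)]
  have h : b.toNat &&& (255:Int).toNat = b.toNat % 256 := by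
    have := Nat.and_two_pow_sub_one_eq_mod b.toNat 8
    norm_num at this ⊢
    exact this
  rw [h, Nat.mod_eq_of_lt (by omega)]
  omega

lemma lor_shiftLeft_eq_add (a x n : Nat) (h : a < 2 ^ n) :
    a ||| (x <<< n) = a + 2 ^ n * x := by
  set N := a ||| (x <<< n) with hN
  have hmod : N % 2 ^ n = a := by
    rw [hN, Nat.or_mod_two_pow, Nat.mod_eq_of_lt h, Nat.shiftLeft_eq,
      Nat.mul_mod_left, Nat.or_zero]
  have hdiv : N / 2 ^ n = x := by
    have ha : a >>> n = 0 := by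
      rw [Nat.shiftRight_eq_div_pow]; exact Nat.div_eq_of_lt h
    rw [← Nat.shiftRight_eq_div_pow, hN, Nat.shiftRight_or_distrib,
      Nat.shiftLeft_shiftRight, ha, Nat.zero_or]
  have := Nat.div_add_mod N (2 ^ n)
  rw [hdiv, hmod] at this
  omega

lemma packFold (data : List Int) (h : ∀ b ∈ data, 0 ≤ b ∧ b < 256) :
    ∀ (a0 n0 : Nat), a0 < 2 ^ n0 →
    data.foldl
      (fun (st : Nat × Nat) b => (st.1 ||| ((PySem.Int.band b 255).toNat <<< st.2), st.2 + 8))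
      (a0, n0) = (a0 + 2 ^ n0 * packVal data, n0 + packWidth data) := by
  induction data with
  | nil => intro a0 n0 _; simp [packVal, packWidth]
  | cons b r ih =>
    intro a0 n0 ha
    have hb := h b (List.mem_cons_self)
    simp only [List.foldl_cons]
    rw [band255 b hb.1 hb.2, lor_shiftLeft_eq_add a0 b.toNat n0 ha]
    have hlt : a0 + 2 ^ n0 * b.toNat < 2 ^ (n0 + 8) := by
      have : b.toNat ≤ 255 := by omega
      rw [pow_add]
      nlinarith
    rw [ih (fun x hx => h x (List.mem_cons_of_mem _ hx)) _ _ hlt]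
    simp only [packVal, packWidth, Prod.mk.injEq, pow_add]
    constructor <;> ring

lemma dig_add_low {b a w j : Nat} (hj : j < w) :
    dig (b + 2 ^ w * a) j = dig b j := by
  obtain ⟨k, hk⟩ : ∃ k, w = j + (k + 1) := ⟨w - j - 1, by omega⟩
  subst hk
  unfold dig
  congr 1
  rw [pow_add, mul_assoc, Nat.add_mul_div_left b _ (Nat.two_pow_pos j)]
  rw [pow_succ, mul_comm (2 ^ k) 2, mul_assoc]
  exact Nat.add_mul_mod_self_left _ 2 _

lemma dig_add_high {b w : Nat} (a j : Nat) (hb : b < 2 ^ w) :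
    dig (b + 2 ^ w * a) (w + j) = dig a j := by
  unfold dig
  congr 2
  rw [pow_add, ← Nat.div_div_eq_div_mul,
    Nat.add_mul_div_left b a (Nat.two_pow_pos w),
    Nat.div_eq_of_lt hb, Nat.zero_add]

lemma bw_eq_8 (b : Int) (h0 : 0 ≤ b) (h1 : b < 256) : max 8 (PySem.Int.bitLength b) = 8 := by
  rcases eq_or_lt_of_le h0 with h | h
  · rw [← h]; decide
  · by_contra hc
    have h9 : 9 ≤ PySem.Int.bitLength b := by omega
    have := PySem.Int.two_pow_bitLength_le b (by omega)
    have h2 : (2:Nat) ^ 8 ≤ 2 ^ (PySem.Int.bitLength b - 1) :=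
      Nat.pow_le_pow_right (by norm_num) (by omega)
    have hna : b.natAbs < 256 := by omega
    omega

lemma unpackBits_eq_digits (data : List Int) (h : ∀ b ∈ data, 0 ≤ b ∧ b < 256) :
    unpackBits data = (List.range (packWidth data)).map (dig (packVal data)) := by
  unfold unpackBits
  rw [PySem.List.foldl_append_eq_flatMap, List.nil_append]
  induction data with
  | nil => simp [packWidth]
  | cons b r ih =>
    have hb := h b (List.mem_cons_self)
    rw [List.flatMap_cons, ih (fun x hx => h x (List.mem_cons_of_mem _ hx))]
    have hbb : byteBits b = (List.range 8).map (dig b.toNat) := by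
      unfold byteBits
      rw [bw_eq_8 b hb.1 hb.2]
      rfl
    rw [hbb]
    simp only [packWidth, packVal, List.range_add, List.map_append, List.map_map]
    have hblt : b.toNat < 2 ^ 8 := by omega
    congr 1
    · apply List.map_congr_left
      intro j hj
      rw [List.mem_range] at hj
      exact (dig_add_low hj).symm
    · apply List.map_congr_left
      intro j _
      simp only [Function.comp_apply]
      exact (dig_add_high (packVal r) j hblt).symm

lemma digits_drop (V W p : Nat) :
    ((List.range W).map (dig V)).drop p = (List.range (W - p)).map (dig (V / 2 ^ p)) := by
  rw [← List.map_drop, List.range_eq_range', List.drop_range']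
  simp only [Nat.zero_add, Nat.mul_one]
  rw [List.range'_eq_map_range, List.map_map, List.range_eq_range']
  apply List.map_congr_left
  intro j _
  simp only [Function.comp_apply]
  unfold dig
  rw [pow_add, ← Nat.div_div_eq_div_mul]

lemma take7_range' (a n : Nat) (h : 7 ≤ n) :
    (List.range' a n).take 7 = List.range' a 7 := by
  have happ := List.range'_append (s := a) (m := 7) (n := n - 7) (step := 1)
  rw [show n = 7 + (n - 7) by omega, ← happ, List.take_left']
  simp

lemma val7 (M a : Nat) :
    septetValue ((List.range' a 7).map (dig M)) = ((M / 2 ^ a % 128 : Nat) : Int) := by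
  have h7 : List.range' a 7 = [a, a+1, a+2, a+3, a+4, a+5, a+6] := by
    rw [List.range'_eq_map_range]
    simp [List.range_succ]
  rw [h7]
  have e : ∀ q : Nat, M / 2 ^ (a + q) = M / 2 ^ a / 2 ^ q := by
    intro q; rw [pow_add, ← Nat.div_div_eq_div_mul]
  simp only [List.map_cons, List.map_nil, septetValue, PySem.List.enumerate_cons,
    PySem.List.enumerate_nil, List.foldl_cons, List.foldl_nil, dig]
  norm_num [e 1, e 2, e 3, e 4, e 5, e 6,
    (show ((0:Int)).toNat = 0 from rfl), (show ((1:Int)).toNat = 1 from rfl),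
    (show ((2:Int)).toNat = 2 from rfl), (show ((3:Int)).toNat = 3 from rfl),
    (show ((4:Int)).toNat = 4 from rfl), (show ((5:Int)).toNat = 5 from rfl),
    (show ((6:Int)).toNat = 6 from rfl)]
  omega

lemma slice_digits (M m t : Nat) (h : 7 * t + 7 ≤ m) :
    PySem.List.slice ((List.range m).map (dig M)) (some (0 + 7 * (t : Int)))
        (some (0 + 7 * (t : Int) + 7)) =
      (List.range' (7 * t) 7).map (dig M) := by
  have h2 : (0 + 7 * (t : Int) + 7) = ((7 * t : Nat) : Int) + ((7 : Nat) : Int) := by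
    push_cast; ring
  have h1 : (0 + 7 * (t : Int)) = ((7 * t : Nat) : Int) := by push_cast; ring
  rw [h2, h1, PySem.List.slice_natCast_add, ← List.map_drop, ← List.map_take,
    List.range_eq_range', List.drop_range']
  simp only [Nat.zero_add, Nat.mul_one]
  rw [take7_range' _ _ (by omega)]

lemma septetsGo_break (bits : List Int) (length : Option Int) (acc : List Int) (l : List Int)
    (h : (length.elim false fun L => decide (L ≤ (acc.length : Int))) = true) :
    septetsGo bits length acc l = acc := by
  cases l <;> simp [septetsGo, h]

lemma septetsGo_skip (bits : List Int) (length : Option Int) (acc : List Int) (n t : Nat)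
    (hk : bits.length < 7 * t + 7) :
    septetsGo bits length acc ((List.range' t n).map (fun k : Nat => 0 + 7 * (k : Int))) = acc := by
  induction n generalizing t acc with
  | zero => simp [septetsGo]
  | succ n ih =>
    rw [List.range'_succ, List.map_cons]
    by_cases hbr : (length.elim false fun L => decide (L ≤ (acc.length : Int))) = true
    · exact septetsGo_break _ _ _ _ hbr
    · have hg : ¬ (0 + 7 * (t : Int) + 7 ≤ (bits.length : Int)) := by push_cast; omega
      simp only [septetsGo, hbr]
      rw [if_neg hg]
      simp only [Bool.false_eq_true, if_false]
      exact ih acc (t + 1) (by omega)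

lemma septetsGo_spec (M m : Nat) (length : Option Int) :
    ∀ (fuel t : Nat) (acc : List Int), acc.length = t → t ≤ capOf (m / 7) length →
      capOf (m / 7) length - t = fuel →
      septetsGo ((List.range m).map (dig M)) length acc
        ((List.range' t ((m + 6) / 7 - t)).map (fun k : Nat => 0 + 7 * (k : Int))) =
      acc ++ (List.range' t (capOf (m / 7) length - t)).map (sf M) := by
  have hlen : ((List.range m).map (dig M)).length = m := by simp
  intro fuel
  induction fuel with
  | zero =>
    intro t acc hacc ht hfuel
    rw [hfuel, List.range', List.map_nil, List.append_nil]
    cases length with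
    | none =>
      apply septetsGo_skip
      rw [hlen]
      simp only [capOf] at ht hfuel
      omega
    | some L =>
      by_cases hL : L ≤ (t : Int)
      · exact septetsGo_break _ _ _ _ (by simp [hacc, hL])
      · apply septetsGo_skip
        rw [hlen]
        simp only [capOf] at ht hfuel
        omega
  | succ n ih =>
    intro t acc hacc ht hfuel
    have hcap : capOf (m / 7) length ≤ m / 7 := by
      cases length <;> simp [capOf]
    have htk : t < m / 7 := by omega
    have hR : (m + 6) / 7 - t = ((m + 6) / 7 - (t + 1)) + 1 := by omega
    rw [hR, List.range'_succ, List.map_cons]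
    have hbr : (length.elim false fun L => decide (L ≤ (acc.length : Int))) = false := by
      cases length with
      | none => rfl
      | some L =>
        simp only [Option.elim, hacc, decide_eq_false_iff_not]
        simp only [capOf] at ht hfuel
        omega
    have hg : (0 + 7 * (t : Int) + 7 ≤ ((((List.range m).map (dig M)).length : Nat) : Int)) := by
      rw [hlen]; push_cast; omega
    simp only [septetsGo, hbr, Bool.false_eq_true, if_false]
    rw [if_pos hg, slice_digits M m t (by omega), val7]
    have h128 : (2 : Nat) ^ (7 * t) = 128 ^ t := by
      rw [pow_mul]; norm_num
    rw [h128]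
    have hrec := ih (t + 1) (acc ++ [((M / 128 ^ t % 128 : Nat) : Int)]) (by simp [hacc])
      (by omega) (by omega)
    rw [hrec, List.append_assoc]
    congr 1
    rw [show capOf (m / 7) length - t = (capOf (m / 7) length - (t + 1)) + 1 by omega,
      List.range'_succ, List.map_cons]
    rfl

lemma unpack_septets_spec (data : List Int) (padding : Int) (length : Option Int)
    (hd : ∀ b ∈ data, 0 ≤ b ∧ b < 256) (hp : 0 ≤ padding) :
    unpack_septets data padding length =
      (List.range (capOf ((packWidth data - padding.toNat) / 7) length)).map
        (sf (packVal data / 2 ^ padding.toNat)) := by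
  unfold unpack_septets
  rw [unpackBits_eq_digits data hd, PySem.List.slice_from _ hp, digits_drop]
  set m := packWidth data - padding.toNat with hm
  set M := packVal data / 2 ^ padding.toNat with hM
  have hlen : ((List.range m).map (dig M)).length = m := by simp
  rw [hlen]
  have hR' : (if (0 : Int) < (m : Int) then (((m : Int) - 0 + 7 - 1) / 7).toNat else 0) =
      (m + 6) / 7 - 0 := by
    split <;> omega
  have hrange : PySem.List.pyRange 0 (m : Int) 7 =
      (List.range' 0 ((m + 6) / 7 - 0)).map (fun k : Nat => 0 + 7 * (k : Int)) := by
    rw [PySem.List.pyRange_of_pos _ _ (by norm_num : (0:Int) < 7), hR', List.range_eq_range']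
  rw [hrange, septetsGo_spec M m length (capOf (m / 7) length) 0 [] rfl (Nat.zero_le _) rfl,
    List.nil_append, List.range_eq_range']
  simp

lemma altGo_spec (turkish : Bool) (length : Option Int) (M W : Nat) (padding : Int)
    (hp : 0 ≤ padding) :
    ∀ (fuel t : Nat), t ≤ capOf ((W - padding.toNat) / 7) length →
      capOf ((W - padding.toNat) / 7) length - t = fuel →
      ∀ (out : List String) (esc : Bool),
      altGo turkish length (M / 128 ^ t) ((W : Int) - padding - 7 * t) (t : Int) out esc =
        decodeGo turkish out esc
          ((List.range' t (capOf ((W - padding.toNat) / 7) length - t)).map (sf M)) := by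
  intro fuel
  induction fuel with
  | zero =>
    intro t ht hfuel out esc
    rw [hfuel, List.range', List.map_nil]
    have hdec : decodeGo turkish out esc [] = out := rfl
    rw [hdec, altGo]
    by_cases hnb : 7 ≤ (W : Int) - padding - 7 * (t : Int)
    · rw [dif_pos hnb]
      cases length with
      | none =>
        exfalso
        simp only [capOf] at ht hfuel
        omega
      | some L =>
        have hc : ¬ ((Option.some L).elim true fun L => decide ((t : Int) < L)) = true := by
          simp only [Option.elim, decide_eq_true_eq]
          simp only [capOf] at ht hfuel
          omega
        rw [if_neg hc]
    · rw [dif_neg hnb]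
  | succ n ih =>
    intro t ht hfuel out esc
    have htk : t < (W - padding.toNat) / 7 := by
      have hcap : capOf ((W - padding.toNat) / 7) length ≤ (W - padding.toNat) / 7 := by
        cases length <;> simp [capOf]
      omega
    rw [show capOf ((W - padding.toNat) / 7) length - t =
        (capOf ((W - padding.toNat) / 7) length - (t + 1)) + 1 by omega, List.range'_succ,
      List.map_cons]
    rw [altGo, dif_pos (by omega)]
    have hcond : (length.elim true fun L => decide ((t : Int) < L)) = true := by
      cases length with
      | none => rfl
      | some L =>
        simp only [Option.elim, decide_eq_true_eq]
        simp only [capOf] at ht hfuel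
        omega
    rw [hcond, if_pos rfl]
    have hacc7 : (M / 128 ^ t) >>> 7 = M / 128 ^ (t + 1) := by
      rw [Nat.shiftRight_eq_div_pow, Nat.div_div_eq_div_mul]
      norm_num [pow_succ]
    have hnb : (W : Int) - padding - 7 * (t : Int) - 7 =
        (W : Int) - padding - 7 * ((t + 1 : Nat) : Int) := by push_cast; ring
    have hcnt : ((t : Int) + 1) = ((t + 1 : Nat) : Int) := by push_cast; ring
    have hsept : ((M / 128 ^ t % 128 : Nat) : Int) = sf M t := rfl
    have hlt : M / 128 ^ t % 128 < 128 := Nat.mod_lt _ (by norm_num)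
    have hlen128 : GSM7_BASIC.length = 128 := rfl
    have hchar : GSM7_BASIC.getD (sf M t).toNat "?" =
        (if sf M t < (GSM7_BASIC.length : Int) then
          (PySem.List.pyGet? GSM7_BASIC (sf M t)).getD "?" else "?") := by
      rw [if_pos (by rw [hlen128]; unfold sf; push_cast; omega)]
      unfold sf
      rw [PySem.List.pyGet?_natCast, Int.toNat_natCast, List.getD_eq_getElem?_getD]
    simp only [hsept]
    rw [hacc7, hnb, hcnt]
    simp only [hchar]
    simp only [decodeGo]
    simp only [ih (t + 1) (by omega) (by omega)]

-- ===== VERDICT (by name: the statement is the Claim_ definition above) =====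
theorem decode_gsm7_spec : Claim_equal_decode_gsm7 := by
  intro data padding length turkish _hdom hpre
  obtain ⟨hd, hp⟩ := hpre
  unfold Spec_decode_gsm7 decode_gsm7
  rw [unpack_septets_spec data padding length hd hp]
  have halt := altGo_spec turkish length (packVal data / 2 ^ padding.toNat) (packWidth data)
    padding hp (capOf ((packWidth data - padding.toNat) / 7) length) 0 (Nat.zero_le _) rfl
    [] false
  simp only [pow_zero, Nat.div_one, Nat.cast_zero, mul_zero, sub_zero, Nat.sub_zero] at halt
  simp only [decode_gsm7_alt, packFold data hd 0 0 (by norm_num), Nat.zero_add, pow_zero,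
    one_mul, Nat.shiftRight_eq_div_pow]
  rw [halt, List.range_eq_range']
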